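-- pv_equiv track=rewrite | github.com/IvanWoo/advent-of-code-2022 | 15/main.py | get_safe_zone
-- ===== SOURCE A (Python) =====
-- def merge(intervals):
--     if len(intervals) == 0:
--         return []
--     ans = []
--     for s, e in sorted(intervals):
--         if not ans or s > ans[-1][1]:
--             ans.append([s, e])
--         else:
--             ans[-1][1] = max(ans[-1][1], e)
--     return ans
--
-- def get_safe_zone(reports, target_y: int):
--     safe_zone = []
--     for sp, _, distance in reports:
--         x, y = sp
--         buffer = abs(y - target_y)
--         if buffer < distance:
--             diff = distance - buffer
--             safe_zone.append([x - diff, x + diff + 1])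
--     return merge(safe_zone)
-- ===== SOURCE B (Python) =====
-- def get_safe_zone(reports, target_y: int):
--     events = []
--     for (x, y), _, distance in reports:
--         diff = distance - abs(y - target_y)
--         if diff > 0:
--             events.append((x - diff, -1))
--             events.append((x + diff + 1, 1))
--     events.sort()
--     result = []
--     count = 0
--     start = 0
--     for coord, tag in events:
--         if tag == -1:
--             if count == 0:
--                 start = coord
--             count += 1
--         else:
--             count -= 1
--             if count == 0:
--                 result.append([start, coord])
--     return result
-- ===== Notes on version B (the rewrite author's own statement) =====
-- stated objective: alternative
-- what changed: Replaced sort-intervals-then-merge-by-mutating-the-last-interval with a sweep line: each covered interval becomes a (+1 at start, -1 at end) event pair, events are sorted once, and a single scan with a running open-interval counter emits a merged interval each time the counter returns to zero.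
import Mathlib
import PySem

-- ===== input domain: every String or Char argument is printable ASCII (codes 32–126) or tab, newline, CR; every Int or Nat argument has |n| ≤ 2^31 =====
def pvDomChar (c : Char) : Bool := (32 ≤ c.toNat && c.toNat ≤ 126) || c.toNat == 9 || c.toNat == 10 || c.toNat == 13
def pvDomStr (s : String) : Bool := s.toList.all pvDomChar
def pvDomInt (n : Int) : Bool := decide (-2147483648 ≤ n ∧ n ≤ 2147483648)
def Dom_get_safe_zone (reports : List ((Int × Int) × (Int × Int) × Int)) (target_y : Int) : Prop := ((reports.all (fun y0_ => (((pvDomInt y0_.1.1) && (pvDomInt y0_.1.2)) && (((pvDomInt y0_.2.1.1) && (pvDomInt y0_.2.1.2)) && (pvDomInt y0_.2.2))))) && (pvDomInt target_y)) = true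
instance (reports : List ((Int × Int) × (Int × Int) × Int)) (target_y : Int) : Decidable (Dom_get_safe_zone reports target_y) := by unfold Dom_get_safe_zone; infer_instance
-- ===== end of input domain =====

-- B replaces sort-then-merge-by-mutating-the-last-interval with a sweep line over
-- (coord, ±1) events; same results, a genuinely different algorithm (objective: alternative).

-- ===== PORT A =====
-- Python's two-element lists [s, e] are represented as pairs (s, e): `sorted(intervals)`
-- on such 2-lists is exactly the lexicographic pair sort (sorted2 by fst, snd).
-- `ans` is kept reversed so that Python's `ans[-1]` is the head (append = cons,
-- `ans[-1][1] = max(...)` = replace head); the final reverse.map renders the [s, e] lists.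
def mergeLoop : List (Int × Int) → List (Int × Int) → List (Int × Int)
  | ans, [] => ans
  | ans, (s, e) :: rest =>
    match ans with
    | [] => mergeLoop [(s, e)] rest
    | (ps, pe) :: t =>
      if s > pe then mergeLoop ((s, e) :: (ps, pe) :: t) rest
      else mergeLoop ((ps, max pe e) :: t) rest

def merge (intervals : List (Int × Int)) : List (List Int) :=
  if intervals.length = 0 then []
  else
    ((mergeLoop [] (PySem.List.sorted2 intervals (fun iv => iv.1) (fun iv => iv.2))).reverse.map
      (fun iv => [iv.1, iv.2]))

def get_safe_zone (reports : List ((Int × Int) × (Int × Int) × Int)) (target_y : Int) : List (List Int) :=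
  merge (reports.foldl (fun safe_zone r =>
    if |r.1.2 - target_y| < r.2.2 then
      safe_zone ++ [(r.1.1 - (r.2.2 - |r.1.2 - target_y|), r.1.1 + (r.2.2 - |r.1.2 - target_y|) + 1)]
    else safe_zone) [])

-- ===== PORT B =====
-- Port of Source B (sweep line).  Python's (coord, tag) tuples and the emitted [start, coord]
-- 2-lists are pairs (the final map renders the lists); `events.sort()` on tuples is the
-- lexicographic pair sort (sorted2 by fst, snd).
def sweepLoop : Int → Int → List (Int × Int) → List (Int × Int) → List (Int × Int)
  | _, _, res, [] => res
  | count, start, res, (coord, tag) :: rest =>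
    if tag = -1 then
      sweepLoop (count + 1) (if count = 0 then coord else start) res rest
    else
      if count - 1 = 0 then sweepLoop (count - 1) start (res ++ [(start, coord)]) rest
      else sweepLoop (count - 1) start res rest

def get_safe_zone_alt (reports : List ((Int × Int) × (Int × Int) × Int)) (target_y : Int) : List (List Int) :=
  (sweepLoop 0 0 []
    (PySem.List.sorted2
      (reports.foldl (fun events r =>
        if 0 < r.2.2 - |r.1.2 - target_y| then
          events ++ [(r.1.1 - (r.2.2 - |r.1.2 - target_y|), -1),
                     (r.1.1 + (r.2.2 - |r.1.2 - target_y|) + 1, 1)]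
        else events) [])
      (fun ev => ev.1) (fun ev => ev.2))).map (fun iv => [iv.1, iv.2])

-- ===== PRECONDITION & SPEC =====
def Spec_get_safe_zone (reports : List ((Int × Int) × (Int × Int) × Int)) (target_y : Int) (out : List (List Int)) : Prop := out = get_safe_zone_alt reports target_y
instance (reports : List ((Int × Int) × (Int × Int) × Int)) (target_y : Int) (out : List (List Int)) : Decidable (Spec_get_safe_zone reports target_y out) := by unfold Spec_get_safe_zone; infer_instance

-- ===== CLAIM (what is proved, stated in full; the proofs are below) =====
def Claim_equal_get_safe_zone : Prop := ∀ (reports : List ((Int × Int) × (Int × Int) × Int)) (target_y : Int), Dom_get_safe_zone reports target_y → Spec_get_safe_zone reports target_y (get_safe_zone reports target_y)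

-- ===== LEMMAS AND PROOFS =====

/-- The intervals both programs build from the reports, in report order. -/
def ivsOf (reports : List ((Int × Int) × (Int × Int) × Int)) (target_y : Int) : List (Int × Int) :=
  (reports.filter (fun r => decide (|r.1.2 - target_y| < r.2.2))).map
    (fun r => (r.1.1 - (r.2.2 - |r.1.2 - target_y|), r.1.1 + (r.2.2 - |r.1.2 - target_y|) + 1))

/-- The two sweep events of one interval. -/
def evs (iv : Int × Int) : List (Int × Int) := [(iv.1, -1), (iv.2, 1)]

/-- Lexicographic order on pairs (Python's tuple/2-list comparison). -/
def lexle (a b : Int × Int) : Prop := a.1 < b.1 ∨ (a.1 = b.1 ∧ a.2 ≤ b.2)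

/-- Boolean version of `lexle`. -/
def lexleB (a b : Int × Int) : Bool :=
  decide (a.1 < b.1) || (decide (a.1 = b.1) && decide (a.2 ≤ b.2))

theorem lexleB_iff (a b : Int × Int) : lexleB a b = true ↔ lexle a b := by
  simp [lexleB, lexle]

/-- A well-formed merged output: nonempty intervals, strictly separated, in order. -/
def OkIv (l : List (Int × Int)) : Prop :=
  (∀ iv ∈ l, iv.1 < iv.2) ∧ l.IsChain (fun a b => a.2 < b.1)

/-- Point coverage by a list of half-open intervals. -/
def cov (l : List (Int × Int)) (p : Int) : Prop := ∃ iv ∈ l, iv.1 ≤ p ∧ p < iv.2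

def nOpens (l : List (Int × Int)) : Nat := l.countP (fun ev => ev.2 == (-1 : Int))
def nCloses (l : List (Int × Int)) : Nat := l.countP (fun ev => ev.2 == (1 : Int))

/-- Point coverage read off an event list by counting. -/
def covE (l : List (Int × Int)) (p : Int) : Prop :=
  l.countP (fun ev => ev.2 == (1 : Int) && decide (ev.1 ≤ p)) <
  l.countP (fun ev => ev.2 == (-1 : Int) && decide (ev.1 ≤ p))

theorem lexle_refl (a : Int × Int) : lexle a a := by simp [lexle]

theorem lexle_trans {a b c : Int × Int} (h1 : lexle a b) (h2 : lexle b c) : lexle a c := by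
  rcases h1 with h1 | ⟨h1, h1'⟩ <;> rcases h2 with h2 | ⟨h2, h2'⟩ <;> unfold lexle <;> omega

theorem cov_nil (p : Int) : ¬ cov [] p := by simp [cov]

theorem cov_cons {a : Int × Int} {l : List (Int × Int)} {p : Int} :
    cov (a :: l) p ↔ (a.1 ≤ p ∧ p < a.2) ∨ cov l p := by
  simp [cov]

theorem cov_reverse (l : List (Int × Int)) (p : Int) : cov l.reverse p ↔ cov l p := by
  simp [cov]

theorem cov_perm {l₁ l₂ : List (Int × Int)} (h : l₁.Perm l₂) (p : Int) :
    cov l₁ p ↔ cov l₂ p := by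
  simp only [cov]
  constructor <;> rintro ⟨iv, hm, h1, h2⟩ <;> exact ⟨iv, by first | exact h.mem_iff.mp hm | exact h.mem_iff.mpr hm, h1, h2⟩

/-- The comparison `sorted2` uses for keys (fst, snd). -/
def bf (a b : Int × Int) : Bool :=
  decide (a.1 < b.1) || (!decide (b.1 < a.1) && decide (a.2 < b.2))

theorem lexle_of_bf {a b : Int × Int} (h : bf a b = true) : lexle a b := by
  simp [bf] at h; unfold lexle; omega

theorem lexle_of_not_bf {a b : Int × Int} (h : bf a b = false) : lexle b a := by
  simp [bf] at h; unfold lexle; omega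

theorem insertBy_pairwise_lexle (x : Int × Int) :
    ∀ (ys : List (Int × Int)), ys.Pairwise lexle →
      (PySem.List.insertBy bf x ys).Pairwise lexle := by
  intro ys
  induction ys with
  | nil => intro _; simp [PySem.List.insertBy]
  | cons y ys ih =>
    intro h
    rw [PySem.List.insertBy]
    by_cases hb : bf x y
    · rw [if_pos hb]
      refine List.pairwise_cons.mpr ⟨?_, h⟩
      intro z hz
      rcases List.mem_cons.mp hz with rfl | hz
      · exact lexle_of_bf hb
      · exact lexle_trans (lexle_of_bf hb) ((List.pairwise_cons.mp h).1 z hz)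
    · rw [if_neg hb]
      refine List.pairwise_cons.mpr ⟨?_, ih (List.pairwise_cons.mp h).2⟩
      intro z hz
      rcases (PySem.List.mem_insertBy bf x z ys).mp hz with rfl | hz
      · exact lexle_of_not_bf (by simpa using hb)
      · exact (List.pairwise_cons.mp h).1 z hz

theorem foldl_insertBy_pairwise_lexle :
    ∀ (xs acc : List (Int × Int)), acc.Pairwise lexle →
      (xs.foldl (fun acc x => PySem.List.insertBy bf x acc) acc).Pairwise lexle := by
  intro xs
  induction xs with
  | nil => intro acc h; simpa using h
  | cons x xs ih =>
    intro acc h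
    exact ih _ (insertBy_pairwise_lexle x acc h)

theorem sorted2_pairwise_lexle (xs : List (Int × Int)) :
    (PySem.List.sorted2 xs (fun iv => iv.1) (fun iv => iv.2) false).Pairwise lexle := by
  have : PySem.List.sorted2 xs (fun iv => iv.1) (fun iv => iv.2) false =
      xs.foldl (fun acc x => PySem.List.insertBy bf x acc) [] := by
    simp only [PySem.List.sorted2]
    rfl
  rw [this]
  exact foldl_insertBy_pairwise_lexle xs [] (by simp)

theorem sweep_res : ∀ (E : List (Int × Int)) (count start : Int) (res : List (Int × Int)),
    sweepLoop count start res E = res ++ sweepLoop count start [] E := by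
  intro E
  induction E with
  | nil => intro count start res; simp [sweepLoop]
  | cons hd tl ih =>
    obtain ⟨c, t⟩ := hd
    intro count start res
    by_cases ht : t = -1
    · simp only [sweepLoop, if_pos ht]
      rw [ih _ _ res, ih _ _ ([] : List (Int × Int))]
    · by_cases hc : count - 1 = 0
      · simp only [sweepLoop, if_neg ht, if_pos hc, List.nil_append]
        rw [ih _ _ (res ++ [(start, c)]), ih _ _ ([(start, c)])]
        simp
      · simp only [sweepLoop, if_neg ht, if_neg hc]
        rw [ih _ _ res, ih _ _ ([] : List (Int × Int))]

theorem sweep_start_irrel : ∀ (E : List (Int × Int)) (count s s' : Int) (res : List (Int × Int)),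
    count ≤ 0 → sweepLoop count s res E = sweepLoop count s' res E := by
  intro E
  induction E with
  | nil => intro _ _ _ _ _; simp [sweepLoop]
  | cons hd tl ih =>
    obtain ⟨c, t⟩ := hd
    intro count s s' res hle
    by_cases ht : t = -1
    · simp only [sweepLoop, if_pos ht]
      by_cases hc : count = 0
      · rw [if_pos hc, if_pos hc]
      · rw [if_neg hc, if_neg hc]
        exact ih _ _ _ _ (by omega)
    · have hc : ¬ (count - 1 = 0) := by omega
      simp only [sweepLoop, if_neg ht, if_neg hc]
      exact ih _ _ _ _ (by omega)

theorem sweepBlock : ∀ (B R : List (Int × Int)) (count start : Int) (res : List (Int × Int)),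
    0 < count →
    (∀ ev ∈ B, ev.2 = -1 ∨ ev.2 = 1) →
    (nOpens B : Int) + count = (nCloses B : Int) →
    (∀ n, n < B.length → ((nCloses (B.take n) : Int) < (nOpens (B.take n) : Int) + count)) →
    ∃ d B', B = B' ++ [(d, 1)] ∧
      sweepLoop count start res (B ++ R) = sweepLoop 0 start (res ++ [(start, d)]) R := by
  intro B R count start res
  induction B generalizing count with
  | nil =>
    intro hpos _ hbal _
    exfalso
    simp [nOpens, nCloses] at hbal
    omega
  | cons hd tl ih =>
    obtain ⟨c, t⟩ := hd
    intro hpos htags hbal hpre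
    have ht : t = -1 ∨ t = 1 := by
      have := htags (c, t) (by simp)
      simpa using this
    rcases ht with rfl | rfl
    · -- an open event: count grows, start unchanged
      have hne : ¬ ((count : Int) = 0) := by omega
      have hred : sweepLoop count start res (((c, -1) :: tl) ++ R) =
          sweepLoop (count + 1) start res (tl ++ R) := by
        simp [List.cons_append, sweepLoop, hne]
      obtain ⟨d, B', hB, hrun⟩ := ih (count + 1) (by omega)
        (fun ev hm => htags ev (by simp [hm]))
        (by simp only [nOpens, nCloses, List.countP_cons] at hbal ⊢; push_cast at hbal ⊢; simp at hbal ⊢; omega)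
        (by
          intro n hn
          have := hpre (n + 1) (by simp; omega)
          simp only [List.take_succ_cons, nOpens, nCloses, List.countP_cons] at this ⊢
          push_cast at this ⊢
          simp at this ⊢
          omega)
      exact ⟨d, (c, -1) :: B', by simp [hB], by rw [hred, hrun]⟩
    · -- a close event
      by_cases hc1 : count = 1
      · subst hc1
        have htl : tl = [] := by
          by_contra hne
          have hlen : 1 < ((c, 1) :: tl).length := by
            simp [List.length_pos_iff.mpr hne]
          have := hpre 1 hlen
          simp [nOpens, nCloses, List.take_succ_cons, List.countP_cons] at this
        subst htl
        refine ⟨c, [], by simp, ?_⟩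
        simp only [List.cons_append, List.nil_append, sweepLoop]
        norm_num
      · have hne1 : ¬ ((1 : Int) = -1) := by norm_num
        have hcm : ¬ ((count : Int) - 1 = 0) := by omega
        have hred : sweepLoop count start res (((c, 1) :: tl) ++ R) =
            sweepLoop (count - 1) start res (tl ++ R) := by
          simp [List.cons_append, sweepLoop, hcm]
        obtain ⟨d, B', hB, hrun⟩ := ih (count - 1) (by omega)
          (fun ev hm => htags ev (by simp [hm]))
          (by simp only [nOpens, nCloses, List.countP_cons] at hbal ⊢; push_cast at hbal ⊢; simp at hbal ⊢; omega)
          (by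
            intro n hn
            have := hpre (n + 1) (by simp; omega)
            simp only [List.take_succ_cons, nOpens, nCloses, List.countP_cons] at this ⊢
            push_cast at this ⊢
            simp at this ⊢
            omega)
        exact ⟨d, (c, 1) :: B', by simp [hB], by rw [hred, hrun]⟩

theorem nOpens_append (l₁ l₂ : List (Int × Int)) : nOpens (l₁ ++ l₂) = nOpens l₁ + nOpens l₂ :=
  List.countP_append

theorem nCloses_append (l₁ l₂ : List (Int × Int)) : nCloses (l₁ ++ l₂) = nCloses l₁ + nCloses l₂ :=
  List.countP_append

theorem countP_takeWhile : ∀ (B : List (Int × Int)), B.Pairwise lexle →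
    ∀ (q : (Int × Int) → Bool) (p : Int),
    B.countP (fun ev => q ev && decide (ev.1 ≤ p)) =
      (B.takeWhile (fun ev => decide (ev.1 ≤ p))).countP q := by
  intro B
  induction B with
  | nil => intro _ q p; simp
  | cons a t ih =>
    intro hpw q p
    by_cases ha : a.1 ≤ p
    · have e : (a :: t).takeWhile (fun ev => decide (ev.1 ≤ p)) =
          a :: t.takeWhile (fun ev => decide (ev.1 ≤ p)) := by
        simp [List.takeWhile_cons, ha]
      rw [e, List.countP_cons, List.countP_cons, ih (List.pairwise_cons.mp hpw).2 q p]
      simp [ha]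
    · have e : (a :: t).takeWhile (fun ev => decide (ev.1 ≤ p)) = [] := by
        simp [List.takeWhile_cons, ha]
      rw [e, List.countP_cons]
      have hz : t.countP (fun ev => q ev && decide (ev.1 ≤ p)) = 0 := by
        refine List.countP_eq_zero.mpr ?_
        intro b hb
        have := (List.pairwise_cons.mp hpw).1 b hb
        simp [lexle] at this
        simp
        intro _
        omega
      rw [hz]
      simp [ha]

theorem sweepMainAux : ∀ (n : Nat) (V : List (Int × Int)), V.length = n →
    V.Pairwise lexle →
    (∀ ev ∈ V, ev.2 = -1 ∨ ev.2 = 1) →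
    nOpens V = nCloses V →
    (∀ k, nCloses (V.take k) ≤ nOpens (V.take k)) →
    (∀ k m, k < m → m ≤ V.length → nOpens (V.take k) = nCloses (V.take k) →
        nOpens (V.take m) = nCloses (V.take m) →
        ∃ u ∈ (V.take m).drop k, ∃ w ∈ (V.take m).drop k, u.1 ≠ w.1) →
    OkIv (sweepLoop 0 0 [] V) ∧
    (∀ iv ∈ sweepLoop 0 0 [] V, ∃ ev ∈ V, ev.2 = -1 ∧ ev.1 = iv.1) ∧
    (∀ p : Int, cov (sweepLoop 0 0 [] V) p ↔ covE V p) := by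
  intro n
  induction n using Nat.strong_induction_on with
  | _ n ihn =>
    intro V hlen hs ht hbal hpre hnd
    match V, hlen with
    | [], hlen =>
      refine ⟨⟨by simp [sweepLoop], by simp [sweepLoop]⟩, by simp [sweepLoop], ?_⟩
      intro p
      simp [sweepLoop, cov, covE]
    | (c, t) :: E, hlen =>
      have ht0 : t = -1 ∨ t = 1 := by simpa using ht (c, t) (by simp)
      have hopen : t = -1 := by
        rcases ht0 with h | h
        · exact h
        · exfalso
          have := hpre 1
          subst h
          simp [nOpens, nCloses, List.take_succ_cons, List.countP_cons] at this
      subst hopen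
      set L := (c, -1) :: E with hLdef
      have hex : ∃ m, 0 < m ∧ nOpens (L.take m) = nCloses (L.take m) :=
        ⟨L.length, by simp [hLdef], by rw [List.take_of_length_le (le_refl _)]; exact hbal⟩
      set m₀ := Nat.find hex with hm₀def
      have hm₀ := Nat.find_spec hex
      have hmin : ∀ k, k < m₀ → ¬ (0 < k ∧ nOpens (L.take k) = nCloses (L.take k)) :=
        fun k hk => Nat.find_min hex hk
      have hm₀pos : 0 < m₀ := hm₀.1
      have hm₀le : m₀ ≤ L.length := by
        by_contra hlt
        push_neg at hlt
        exact hmin L.length hlt ⟨by simp [hLdef], by rw [List.take_of_length_le (le_refl _)]; exact hbal⟩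
      set B := L.take m₀ with hB
      set R := L.drop m₀ with hR
      have hLBR : L = B ++ R := (List.take_append_drop m₀ L).symm
      have hBlen : B.length = m₀ := by rw [hB, List.length_take]; omega
      have hBcons : B = (c, -1) :: E.take (m₀ - 1) := by
        rw [hB]
        rcases Nat.exists_eq_add_of_lt hm₀pos with ⟨k, hk⟩
        rw [show m₀ = k + 1 by omega]
        simp [hLdef, List.take_succ_cons]
      set B₁ := E.take (m₀ - 1) with hB₁
      have hstrict : ∀ k, 0 < k → k < m₀ → nCloses (L.take k) < nOpens (L.take k) := by
        intro k hk1 hk2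
        have h1 := hpre k
        have h2 := hmin k hk2
        simp [hk1] at h2
        omega
      have hbalB : nOpens B = nCloses B := hm₀.2
      have hElen : E.length + 1 = L.length := by simp [hLdef]
      have hB₁len : B₁.length = m₀ - 1 := by
        rw [hB₁, List.length_take]
        omega
      have htagsB₁ : ∀ ev ∈ B₁, ev.2 = -1 ∨ ev.2 = 1 := by
        intro ev hm
        exact ht ev (List.mem_cons_of_mem _ ((List.take_sublist _ E).subset hm))
      have hbalB₁ : (nOpens B₁ : Int) + 1 = (nCloses B₁ : Int) := by
        have := hbalB
        rw [hBcons] at this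
        simp only [nOpens, nCloses, List.countP_cons] at this
        simp only [nOpens, nCloses]
        simp at this
        omega
      have hpreB₁ : ∀ k, k < B₁.length → ((nCloses (B₁.take k) : Int) < (nOpens (B₁.take k) : Int) + 1) := by
        intro k hk
        have hk' : k + 1 < m₀ := by omega
        have hstr := hstrict (k + 1) (by omega) hk'
        have e1 : L.take (k + 1) = (c, -1) :: E.take k := by
          simp [hLdef, List.take_succ_cons]
        have e2 : B₁.take k = E.take k := by
          rw [hB₁, List.take_take, Nat.min_eq_left (by omega)]
        rw [e1] at hstr
        rw [e2]
        simp only [nOpens, nCloses, List.countP_cons] at hstr ⊢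
        simp at hstr
        omega
      obtain ⟨d, B'', hB₁eq, hrun⟩ := sweepBlock B₁ R 1 c [] (by norm_num) htagsB₁ hbalB₁ hpreB₁
      have hrun0 : sweepLoop 0 0 [] L = (c, d) :: sweepLoop 0 0 [] R := by
        have e1 : sweepLoop 0 0 [] L = sweepLoop 1 c [] (B₁ ++ R) := by
          conv_lhs => rw [hLBR, hBcons]
          simp [sweepLoop]
        rw [e1, hrun]
        simp only [List.nil_append]
        rw [sweep_res R 0 c [(c, d)], sweep_start_irrel R 0 c 0 [] (le_refl 0)]
        simp
      -- coordinate bounds inside the block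
      have hBpw : B.Pairwise lexle := List.Pairwise.sublist (List.take_sublist m₀ L) hs
      have hBfull : B = ((c, -1) :: B'') ++ [(d, 1)] := by rw [hBcons, hB₁eq]; rfl
      have hdmem : (d, 1) ∈ B := by rw [hBfull]; simp
      have hcoordB : ∀ ev ∈ B, c ≤ ev.1 ∧ ev.1 ≤ d := by
        intro ev hm
        rw [hBfull] at hm
        have hpw2 := hBfull ▸ hBpw
        rcases List.pairwise_append.mp hpw2 with ⟨hp1, _, hcross⟩
        constructor
        · rcases List.mem_append.mp hm with hm' | hm'
          · rcases List.mem_cons.mp hm' with rfl | hm''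
            · exact le_refl _
            · have := (List.pairwise_cons.mp hp1).1 ev hm''
              simp [lexle] at this
              omega
          · simp at hm'
            subst hm'
            have := hcross (c, -1) (by simp) (d, 1) (by simp)
            simp [lexle] at this
            omega
        · rcases List.mem_append.mp hm with hm' | hm'
          · have := hcross ev hm' (d, 1) (by simp)
            simp [lexle] at this
            omega
          · simp at hm'
            subst hm'
            exact le_refl _
      have hcd : c < d := by
        have h0 : nOpens (L.take 0) = nCloses (L.take 0) := by simp [nOpens, nCloses]
        obtain ⟨u, hu, w, hw, hne⟩ := hnd 0 m₀ hm₀pos hm₀le h0 hbalB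
        simp only [List.drop_zero] at hu hw
        rw [← hB] at hu hw
        have h1 := hcoordB u hu
        have h2 := hcoordB w hw
        omega
      -- every event of R lies strictly above d
      have hRcoord : ∀ r ∈ R, d < r.1 := by
        cases hRc : R with
        | nil => simp
        | cons r₀ R' =>
          have hr₀mem : r₀ ∈ L := by rw [hLBR, hRc]; simp
          have htake1 : L.take (m₀ + 1) = B ++ [r₀] := by
            rw [List.take_add, ← hB, ← hR, hRc]
            simp
          have hr₀open : r₀.2 = -1 := by
            rcases ht r₀ hr₀mem with h | h
            · exact h
            · exfalso
              have hp := hpre (m₀ + 1)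
              rw [htake1] at hp
              rw [nOpens_append, nCloses_append] at hp
              have hbalB' : B.countP (fun ev => ev.2 == (-1 : Int)) =
                  B.countP (fun ev => ev.2 == (1 : Int)) := hbalB
              simp only [nOpens, nCloses, List.countP_cons, List.countP_nil, h] at hp
              simp at hp
              omega
          have hpair2 := List.pairwise_append.mp (hLBR ▸ hs)
          have hd_r₀ : d < r₀.1 := by
            have := hpair2.2.2 (d, 1) hdmem r₀ (by rw [hRc]; simp)
            simp [lexle] at this
            rcases this with h | ⟨h1, h2⟩
            · exact h
            · rw [hr₀open] at h2; omega
          have hpairR : R.Pairwise lexle := List.Pairwise.sublist (hR ▸ List.drop_sublist m₀ L) hs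
          rw [hRc] at hpairR
          intro r hr
          rcases List.mem_cons.mp hr with rfl | hr'
          · exact hd_r₀
          · have := (List.pairwise_cons.mp hpairR).1 r hr'
            simp [lexle] at this
            omega
      -- induction hypothesis on R
      have hRlen : R.length < n := by
        have : L.length = n := hlen
        rw [hR, List.length_drop]
        omega
      have hRpw : R.Pairwise lexle := List.Pairwise.sublist (hR ▸ List.drop_sublist m₀ L) hs
      have htR : ∀ ev ∈ R, ev.2 = -1 ∨ ev.2 = 1 := by
        intro ev hm
        exact ht ev (by rw [hLBR]; exact List.mem_append_right _ hm)
      have hbalV' : nOpens B + nOpens R = nCloses B + nCloses R := by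
        have := hbal
        rw [hLBR, nOpens_append, nCloses_append] at this
        exact this
      have hbalR : nOpens R = nCloses R := by omega
      have htakeBk : ∀ k : Nat, L.take (m₀ + k) = B ++ R.take k := by
        intro k
        rw [List.take_add, ← hB, ← hR]
      have hpreR : ∀ k, nCloses (R.take k) ≤ nOpens (R.take k) := by
        intro k
        have hp := hpre (m₀ + k)
        rw [htakeBk k, nOpens_append, nCloses_append] at hp
        omega
      have hndR : ∀ k m, k < m → m ≤ R.length → nOpens (R.take k) = nCloses (R.take k) →
          nOpens (R.take m) = nCloses (R.take m) →
          ∃ u ∈ (R.take m).drop k, ∃ w ∈ (R.take m).drop k, u.1 ≠ w.1 := by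
        intro k m hkm hmle hbk hbm
        have hLlen : L.length = B.length + R.length := by rw [hLBR, List.length_append]
        have h1 : nOpens (L.take (m₀ + k)) = nCloses (L.take (m₀ + k)) := by
          rw [htakeBk k, nOpens_append, nCloses_append]
          omega
        have h2 : nOpens (L.take (m₀ + m)) = nCloses (L.take (m₀ + m)) := by
          rw [htakeBk m, nOpens_append, nCloses_append]
          omega
        obtain ⟨u, hu, w, hw, hne⟩ := hnd (m₀ + k) (m₀ + m) (by omega) (by omega) h1 h2
        have e3 : (L.take (m₀ + m)).drop (m₀ + k) = (R.take m).drop k := by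
          rw [htakeBk m, List.drop_append, hBlen]
          have : (B.drop (m₀ + k)) = [] := by
            apply List.drop_eq_nil_of_le
            omega
          rw [this]
          simp
        rw [e3] at hu hw
        exact ⟨u, hu, w, hw, hne⟩
      obtain ⟨hOkR, hC3R, hcovR⟩ := ihn R.length hRlen R rfl hRpw htR hbalR hpreR hndR
      rw [hrun0]
      constructor
      · constructor
        · intro iv hm
          rcases List.mem_cons.mp hm with rfl | hm
          · exact hcd
          · exact hOkR.1 iv hm
        · refine List.isChain_cons.mpr ⟨?_, hOkR.2⟩
          intro y hy
          have hym : y ∈ sweepLoop 0 0 [] R := List.mem_of_mem_head? hy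
          obtain ⟨ev, hevm, _, heveq⟩ := hC3R y hym
          have := hRcoord ev hevm
          show d < y.1
          omega
      constructor
      · intro iv hm
        rcases List.mem_cons.mp hm with rfl | hm
        · exact ⟨(c, -1), by simp [hLdef], rfl, rfl⟩
        · obtain ⟨ev, hevm, h1, h2⟩ := hC3R iv hm
          exact ⟨ev, by rw [hLBR]; exact List.mem_append_right _ hevm, h1, h2⟩
      · intro p
        rw [cov_cons]
        rw [hcovR p]
        by_cases hp : p < d
        · have hz1 : R.countP (fun ev => ev.2 == (1 : Int) && decide (ev.1 ≤ p)) = 0 := by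
            refine List.countP_eq_zero.mpr ?_
            intro a ha
            have := hRcoord a ha
            simp
            intro _
            omega
          have hz2 : R.countP (fun ev => ev.2 == (-1 : Int) && decide (ev.1 ≤ p)) = 0 := by
            refine List.countP_eq_zero.mpr ?_
            intro a ha
            have := hRcoord a ha
            simp
            intro _
            omega
          have hcovRz : ¬ covE R p := by simp [covE, hz1, hz2]
          have hsplit : covE L p ↔ covE B p := by
            rw [hLBR]
            simp [covE, List.countP_append, hz1, hz2]
          rw [hsplit]
          have hkey : c ≤ p → covE B p := by
            intro hcp
            set tk := B.takeWhile (fun ev => decide (ev.1 ≤ p)) with htkdef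
            have htkpre : tk <+: B := List.takeWhile_prefix _
            have htke : tk = B.take tk.length := List.prefix_iff_eq_take.mp htkpre
            have hcount := countP_takeWhile B hBpw
            have htklen1 : 0 < tk.length := by
              rw [htkdef, hBcons]
              rw [List.takeWhile_cons]
              simp [hcp]
            have htklen2 : tk.length < B.length := by
              rcases Nat.lt_or_ge tk.length B.length with h | h
              · exact h
              · exfalso
                have hle := htkpre.length_le
                have : tk = B := by
                  rw [htke, List.take_of_length_le h]
                have hdm : (d, 1) ∈ tk := this ▸ hdmem
                have := List.mem_takeWhile_imp hdm
                simp at this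
                omega
            have hstr := hstrict tk.length htklen1 (by omega)
            have etk : B.take tk.length = L.take tk.length := by
              rw [hB, List.take_take]
              congr 1
              omega
            have e1 : B.countP (fun ev => ev.2 == (1 : Int) && decide (ev.1 ≤ p)) =
                nCloses (L.take tk.length) := by
              rw [hcount, ← htkdef]
              conv_lhs => rw [htke, etk]
              rfl
            have e2 : B.countP (fun ev => ev.2 == (-1 : Int) && decide (ev.1 ≤ p)) =
                nOpens (L.take tk.length) := by
              rw [hcount, ← htkdef]
              conv_lhs => rw [htke, etk]
              rfl
            rw [covE, e1, e2]
            exact hstr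
          constructor
          · rintro (⟨h1, _⟩ | hcr)
            · exact hkey h1
            · exact absurd hcr hcovRz
          · intro hBc
            left
            refine ⟨?_, hp⟩
            by_contra hpc
            push_neg at hpc
            have hz3 : B.countP (fun ev => ev.2 == (1 : Int) && decide (ev.1 ≤ p)) = 0 := by
              refine List.countP_eq_zero.mpr ?_
              intro a ha
              have := hcoordB a ha
              simp
              intro _
              omega
            have hz4 : B.countP (fun ev => ev.2 == (-1 : Int) && decide (ev.1 ≤ p)) = 0 := by
              refine List.countP_eq_zero.mpr ?_
              intro a ha
              have := hcoordB a ha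
              simp
              intro _
              omega
            rw [covE, hz3, hz4] at hBc
            omega
        · push_neg at hp
          have hBf1 : B.countP (fun ev => ev.2 == (1 : Int) && decide (ev.1 ≤ p)) = nCloses B := by
            refine List.countP_congr ?_
            intro a ha
            have := hcoordB a ha
            simp
            intro _
            omega
          have hBf2 : B.countP (fun ev => ev.2 == (-1 : Int) && decide (ev.1 ≤ p)) = nOpens B := by
            refine List.countP_congr ?_
            intro a ha
            have := hcoordB a ha
            simp
            intro _
            omega
          have hsplit : covE L p ↔ covE R p := by
            rw [hLBR]
            simp only [covE, List.countP_append, hBf1, hBf2]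
            omega
          rw [hsplit]
          have hfalse : ¬ (c ≤ p ∧ p < d) := by omega
          tauto

theorem sweepMain (V : List (Int × Int))
    (hs : V.Pairwise lexle)
    (ht : ∀ ev ∈ V, ev.2 = -1 ∨ ev.2 = 1)
    (hbal : nOpens V = nCloses V)
    (hpre : ∀ k, nCloses (V.take k) ≤ nOpens (V.take k))
    (hnd : ∀ k m, k < m → m ≤ V.length → nOpens (V.take k) = nCloses (V.take k) →
        nOpens (V.take m) = nCloses (V.take m) →
        ∃ u ∈ (V.take m).drop k, ∃ w ∈ (V.take m).drop k, u.1 ≠ w.1) :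
    OkIv (sweepLoop 0 0 [] V) ∧
    (∀ iv ∈ sweepLoop 0 0 [] V, ∃ ev ∈ V, ev.2 = -1 ∧ ev.1 = iv.1) ∧
    (∀ p : Int, cov (sweepLoop 0 0 [] V) p ↔ covE V p) :=
  sweepMainAux V.length V rfl hs ht hbal hpre hnd
  

theorem mergeInv : ∀ (l acc : List (Int × Int)),
    (∀ iv ∈ l, iv.1 < iv.2) →
    l.Pairwise (fun a b => a.1 ≤ b.1) →
    (∀ iv ∈ acc, iv.1 < iv.2) →
    acc.IsChain (fun a b => b.2 < a.1) →
    (∀ a ∈ acc, ∀ x ∈ l, a.1 ≤ x.1) →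
    OkIv (mergeLoop acc l).reverse ∧
    ∀ p, cov (mergeLoop acc l).reverse p ↔ (cov acc p ∨ cov l p) := by
  intro l
  induction l with
  | nil =>
    intro acc _ _ hacc hchain _
    constructor
    · exact ⟨fun iv hm => hacc iv (List.mem_reverse.mp hm),
        (List.isChain_reverse).mpr hchain⟩
    · intro p
      simp only [mergeLoop, cov_reverse]
      have := cov_nil p
      tauto
  | cons hd rest ih =>
    obtain ⟨s, e⟩ := hd
    intro acc hl hpair hacc hchain hlast
    have hse : s < e := hl (s, e) (by simp)
    have hpairc := List.pairwise_cons.mp hpair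
    match acc with
    | [] =>
      have hred : mergeLoop [] ((s, e) :: rest) = mergeLoop [(s, e)] rest := by
        simp [mergeLoop]
      rw [hred]
      have hres := ih [(s, e)] (fun iv hm => hl iv (by simp [hm])) hpairc.2
        (by intro iv hm; rw [List.mem_singleton] at hm; subst hm; exact hse)
        (by simp)
        (by intro a ha x hx; simp at ha; subst ha; exact hpairc.1 x hx)
      refine ⟨hres.1, ?_⟩
      intro p
      rw [hres.2 p]
      have h0 := cov_nil p
      rw [cov_cons, cov_cons]
      tauto
    | (ps, pe) :: t =>
      have hpspe : ps < pe := hacc (ps, pe) (by simp)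
      by_cases hgt : s > pe
      · have hred : mergeLoop ((ps, pe) :: t) ((s, e) :: rest) =
            mergeLoop ((s, e) :: (ps, pe) :: t) rest := by
          simp [mergeLoop, hgt]
        rw [hred]
        have hres := ih ((s, e) :: (ps, pe) :: t)
          (fun iv hm => hl iv (by simp [hm])) hpairc.2
          (by
            intro iv hm
            rcases List.mem_cons.mp hm with rfl | hm
            · exact hse
            · exact hacc iv hm)
          (by
            exact List.isChain_cons_cons.mpr ⟨hgt, hchain⟩)
          (by
            intro a ha x hx
            rcases List.mem_cons.mp ha with rfl | ha
            · exact hpairc.1 x hx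
            · exact hlast a ha x (by simp [hx]))
        refine ⟨hres.1, ?_⟩
        intro p
        rw [hres.2 p]
        simp only [cov_cons]
        tauto
      · have hred : mergeLoop ((ps, pe) :: t) ((s, e) :: rest) =
            mergeLoop ((ps, max pe e) :: t) rest := by
          simp [mergeLoop, hgt]
        rw [hred]
        have hps_s : ps ≤ s := hlast (ps, pe) (by simp) (s, e) (by simp)
        have hres := ih ((ps, max pe e) :: t)
          (fun iv hm => hl iv (by simp [hm])) hpairc.2
          (by
            intro iv hm
            rcases List.mem_cons.mp hm with rfl | hm
            · simp only
              omega
            · exact hacc iv (List.mem_cons_of_mem _ hm))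
          (by
            rcases List.isChain_cons.mp hchain with ⟨hh, htl⟩
            refine List.isChain_cons.mpr ⟨?_, htl⟩
            intro y hy
            exact hh y hy)
          (by
            intro a ha x hx
            rcases List.mem_cons.mp ha with rfl | ha
            · exact hlast (ps, pe) (by simp) x (by simp [hx])
            · exact hlast a (by simp [ha]) x (by simp [hx]))
        refine ⟨hres.1, ?_⟩
        intro p
        rw [hres.2 p]
        simp only [cov_cons]
        have key : ((ps, max pe e).1 ≤ p ∧ p < (ps, max pe e).2) ↔
            (((ps, pe).1 ≤ p ∧ p < (ps, pe).2) ∨ ((s, e).1 ≤ p ∧ p < (s, e).2)) := by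
          simp only
          omega
        rw [key]
        tauto

theorem okTail {a : Int × Int} {t : List (Int × Int)} (h : OkIv (a :: t)) : OkIv t :=
  ⟨fun iv hm => h.1 iv (List.mem_cons_of_mem _ hm), (List.isChain_cons.mp h.2).2⟩

theorem okHeadLt : ∀ (t : List (Int × Int)) (s e : Int), OkIv ((s, e) :: t) →
    ∀ iv ∈ t, e < iv.1 := by
  intro t
  induction t with
  | nil => simp
  | cons b t' ih =>
    intro s e hok iv hm
    obtain ⟨b1, b2⟩ := b
    have h1 : e < b1 := (List.isChain_cons_cons.mp hok.2).1
    rcases List.mem_cons.mp hm with rfl | hm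
    · exact h1
    · have hb : b1 < b2 := hok.1 (b1, b2) (by simp)
      have := ih b1 b2 (okTail hok) iv hm
      omega

theorem uniq : ∀ (l1 l2 : List (Int × Int)), OkIv l1 → OkIv l2 →
    (∀ p, cov l1 p ↔ cov l2 p) → l1 = l2 := by
  intro l1
  induction l1 with
  | nil =>
    intro l2 _ hok2 hcov
    cases l2 with
    | nil => rfl
    | cons b t =>
      obtain ⟨s2, e2⟩ := b
      exfalso
      have hc2 : cov ((s2, e2) :: t) s2 := by
        refine ⟨(s2, e2), ?_, le_refl _, hok2.1 (s2, e2) (by simp)⟩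
        simp
      exact (cov_nil s2) ((hcov s2).mpr hc2)
  | cons a t1 ih =>
    obtain ⟨s1, e1⟩ := a
    intro l2 hok1 hok2 hcov
    cases l2 with
    | nil =>
      exfalso
      have hc1 : cov ((s1, e1) :: t1) s1 := by
        refine ⟨(s1, e1), ?_, le_refl _, hok1.1 (s1, e1) (by simp)⟩
        simp
      exact (cov_nil s1) ((hcov s1).mp hc1)
    | cons b t2 =>
      obtain ⟨s2, e2⟩ := b
      have hse1 : s1 < e1 := hok1.1 (s1, e1) (by simp)
      have hse2 : s2 < e2 := hok2.1 (s2, e2) (by simp)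
      have h12 : s2 ≤ s1 := by
        have hw1 : cov ((s1, e1) :: t1) s1 := by
          refine ⟨(s1, e1), ?_, le_refl _, hse1⟩
          simp
        have hc : cov ((s2, e2) :: t2) s1 := (hcov s1).mp hw1
        rcases cov_cons.mp hc with h | ⟨iv, hm, hle, _⟩
        · exact h.1
        · have := okHeadLt t2 s2 e2 hok2 iv hm; omega
      have h21 : s1 ≤ s2 := by
        have hw2 : cov ((s2, e2) :: t2) s2 := by
          refine ⟨(s2, e2), ?_, le_refl _, hse2⟩
          simp
        have hc : cov ((s1, e1) :: t1) s2 := (hcov s2).mpr hw2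
        rcases cov_cons.mp hc with h | ⟨iv, hm, hle, _⟩
        · exact h.1
        · have := okHeadLt t1 s1 e1 hok1 iv hm; omega
      have hs : s1 = s2 := le_antisymm h21 h12
      have he : e1 = e2 := by
        by_contra hne
        rcases lt_or_gt_of_ne hne with hlt | hgt
        · have hc : cov ((s1, e1) :: t1) e1 := (hcov e1).mpr (cov_cons.mpr (Or.inl ⟨show s2 ≤ (e1:Int) by omega, show (e1:Int) < e2 from hlt⟩))
          rcases cov_cons.mp hc with h | ⟨iv, hm, hle, _⟩
          · simp at h
          · have := okHeadLt t1 s1 e1 hok1 iv hm; omega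
        · have hc : cov ((s2, e2) :: t2) e2 := (hcov e2).mp (cov_cons.mpr (Or.inl ⟨show s1 ≤ (e2:Int) by omega, show (e2:Int) < e1 from hgt⟩))
          rcases cov_cons.mp hc with h | ⟨iv, hm, hle, _⟩
          · simp at h
          · have := okHeadLt t2 s2 e2 hok2 iv hm; omega
      have ht : t1 = t2 := by
        refine ih t2 (okTail hok1) (okTail hok2) ?_
        intro p
        constructor
        · intro hp
          obtain ⟨iv, hm, hle, hlt⟩ := hp
          have hgt1 : e1 < iv.1 := okHeadLt t1 s1 e1 hok1 iv hm
          have hc : cov ((s2, e2) :: t2) p :=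
            (hcov p).mp (cov_cons.mpr (Or.inr ⟨iv, hm, hle, hlt⟩))
          rcases cov_cons.mp hc with h | h
          · simp at h; omega
          · exact h
        · intro hp
          obtain ⟨iv, hm, hle, hlt⟩ := hp
          have hgt2 : e2 < iv.1 := okHeadLt t2 s2 e2 hok2 iv hm
          have hc : cov ((s1, e1) :: t1) p :=
            (hcov p).mpr (cov_cons.mpr (Or.inr ⟨iv, hm, hle, hlt⟩))
          rcases cov_cons.mp hc with h | h
          · simp at h; omega
          · exact h
      rw [hs, he, ht]

theorem countP_flat (ivs : List (Int × Int)) (q : (Int × Int) → Bool) :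
    (ivs.flatMap evs).countP q =
      ivs.countP (fun iv => q (iv.1, -1)) + ivs.countP (fun iv => q (iv.2, 1)) := by
  induction ivs with
  | nil => simp
  | cons iv t ih =>
    rw [List.flatMap_cons, List.countP_append, ih, List.countP_cons, List.countP_cons]
    have he : (evs iv).countP q = ((if q (iv.1, -1) then 1 else 0) + if q (iv.2, 1) then 1 else 0) := by
      simp [evs, List.countP_cons]
      cases hq1 : q (iv.1, -1) <;> cases hq2 : q (iv.2, 1) <;> simp [hq1, hq2]
    rw [he]
    omega

theorem countP_strict {l : List (Int × Int)} {q r : (Int × Int) → Bool}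
    (hmono : ∀ a ∈ l, q a = true → r a = true)
    (a : Int × Int) (ham : a ∈ l) (har : r a = true) (haq : q a = false) :
    l.countP q < l.countP r := by
  obtain ⟨l₁, l₂, rfl⟩ := List.append_of_mem ham
  rw [List.countP_append, List.countP_append, List.countP_cons, List.countP_cons]
  have h1 : l₁.countP q ≤ l₁.countP r := List.countP_mono_left (fun x hx => hmono x (by simp [hx]))
  have h2 : l₂.countP q ≤ l₂.countP r := List.countP_mono_left (fun x hx => hmono x (by simp [hx]))
  simp [har, haq]
  omega

theorem pairwise_lexle_getLast : ∀ (l : List (Int × Int)) (h : l ≠ []),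
    l.Pairwise lexle → ∀ y ∈ l, lexle y (l.getLast h) := by
  intro l
  induction l with
  | nil => simp
  | cons a t ih =>
    intro h hp y hy
    cases t with
    | nil =>
      rw [List.mem_singleton] at hy
      subst hy
      exact lexle_refl _
    | cons b t' =>
      rw [List.getLast_cons (by simp)]
      rcases List.mem_cons.mp hy with rfl | hy'
      · exact (List.pairwise_cons.mp hp).1 _ (List.getLast_mem _)
      · exact ih (by simp) (List.pairwise_cons.mp hp).2 y hy'

/-- The sorted event list both concrete hypotheses are about. -/
def VOf (ivs : List (Int × Int)) : List (Int × Int) :=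
  PySem.List.sorted2 (ivs.flatMap evs) (fun ev => ev.1) (fun ev => ev.2) false

theorem permV (ivs : List (Int × Int)) : (VOf ivs).Perm (ivs.flatMap evs) :=
  PySem.List.sorted2_perm (ivs.flatMap evs) (fun ev => ev.1) (fun ev => ev.2) false

theorem tags_V (ivs : List (Int × Int)) : ∀ ev ∈ VOf ivs, ev.2 = -1 ∨ ev.2 = 1 := by
  intro ev hm
  have hmem : ev ∈ ivs.flatMap evs := ((permV ivs).mem_iff).mp hm
  obtain ⟨iv, _, hmem2⟩ := List.mem_flatMap.mp hmem
  simp [evs] at hmem2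
  rcases hmem2 with rfl | rfl <;> simp

theorem bal_V (ivs : List (Int × Int)) : nOpens (VOf ivs) = nCloses (VOf ivs) := by
  unfold nOpens nCloses
  rw [List.Perm.countP_eq _ (permV ivs), List.Perm.countP_eq _ (permV ivs),
    countP_flat, countP_flat]
  simp

theorem splitV (V : List (Int × Int)) (k : Nat) (pr : (Int × Int) → Bool) :
    V.countP pr = (V.take k).countP pr + (V.drop k).countP pr := by
  conv_lhs => rw [← List.take_append_drop k V]
  rw [List.countP_append]

theorem pre_V (ivs : List (Int × Int)) (hse : ∀ iv ∈ ivs, iv.1 < iv.2) :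
    ∀ k, nCloses ((VOf ivs).take k) ≤ nOpens ((VOf ivs).take k) := by
  intro k
  set V := VOf ivs with hVdef
  rcases Nat.eq_zero_or_pos k with rfl | hk0
  · simp [nOpens, nCloses]
  rcases Nat.lt_or_ge k V.length with hklen | hklen
  swap
  · rw [List.take_of_length_le hklen]
    exact le_of_eq (bal_V ivs).symm
  set tk := V.take k with htkdef
  have htklen : tk.length = k := by
    rw [htkdef, List.length_take]
    omega
  have htkne : tk ≠ [] := by
    intro h
    rw [h] at htklen
    simp at htklen
    omega
  set x := tk.getLast htkne with hxdef
  have hVpw : V.Pairwise lexle := sorted2_pairwise_lexle _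
  have htkpw : tk.Pairwise lexle := List.Pairwise.sublist (List.take_sublist _ _) hVpw
  have h1 : ∀ y ∈ tk, lexle y x := pairwise_lexle_getLast tk htkne htkpw
  have hxmem : x ∈ tk := List.getLast_mem htkne
  have hsplitpw := List.pairwise_append.mp ((List.take_append_drop k V).symm ▸ hVpw)
  have h2 : ∀ y ∈ V.drop k, lexle x y := fun y hy => hsplitpw.2.2 x hxmem y hy
  have step1 : nCloses tk ≤ V.countP (fun ev => ev.2 == (1 : Int) && lexleB ev x) := by
    refine le_trans (List.countP_mono_left ?_) ((List.take_sublist k V).countP_le)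
    intro a ha hq
    simp only [Bool.and_eq_true]
    exact ⟨hq, (lexleB_iff a x).mpr (h1 a ha)⟩
  have step2 : V.countP (fun ev => ev.2 == (-1 : Int) && !(lexleB x ev)) ≤ nOpens tk := by
    have hz : (V.drop k).countP (fun ev => ev.2 == (-1 : Int) && !(lexleB x ev)) = 0 := by
      refine List.countP_eq_zero.mpr ?_
      intro a ha
      simp [(lexleB_iff x a).mpr (h2 a ha)]
    rw [splitV V k, ← htkdef, hz]
    simp only [Nat.add_zero]
    exact List.countP_mono_left (fun a _ hq => by
      simp only [Bool.and_eq_true] at hq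
      exact hq.1)
  have hcmp : V.countP (fun ev => ev.2 == (1 : Int) && lexleB ev x) ≤
      V.countP (fun ev => ev.2 == (-1 : Int) && !(lexleB x ev)) := by
    rw [List.Perm.countP_eq _ (permV ivs), List.Perm.countP_eq _ (permV ivs),
      countP_flat, countP_flat]
    simp only [show ((-1 : Int) == (1 : Int)) = false by decide,
      show ((1 : Int) == (1 : Int)) = true by decide,
      show ((-1 : Int) == (-1 : Int)) = true by decide,
      show ((1 : Int) == (-1 : Int)) = false by decide,
      Bool.false_and, Bool.true_and, List.countP_false, Nat.zero_add, Nat.add_zero]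
    try simp only [Function.const_apply, Nat.zero_add, Nat.add_zero]
    apply List.countP_mono_left
    intro a ha hq
    have hqa := (lexleB_iff _ _).mp hq
    have hab := hse a ha
    cases hlb : lexleB x (a.1, -1)
    · simp
    · exfalso
      have h2' := (lexleB_iff _ _).mp hlb
      simp only [lexle] at hqa h2'
      try simp only at hqa h2'
      omega
  omega

theorem nd_V (ivs : List (Int × Int)) (hse : ∀ iv ∈ ivs, iv.1 < iv.2) :
    ∀ k m, k < m → m ≤ (VOf ivs).length →
      nOpens ((VOf ivs).take k) = nCloses ((VOf ivs).take k) →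
      nOpens ((VOf ivs).take m) = nCloses ((VOf ivs).take m) →
      ∃ u ∈ ((VOf ivs).take m).drop k, ∃ w ∈ ((VOf ivs).take m).drop k, u.1 ≠ w.1 := by
  intro k m hkm hmle hbk hbm
  by_contra hcon
  push_neg at hcon
  set V := VOf ivs with hVdef
  set S := (V.take m).drop k with hS
  have hVpw : V.Pairwise lexle := sorted2_pairwise_lexle _
  have hSlen : S.length = m - k := by
    rw [hS, List.length_drop, List.length_take]
    omega
  have hSne : S ≠ [] := by
    intro h
    rw [h] at hSlen
    simp at hSlen
    omega
  have hTm : V.take m = V.take k ++ S := by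
    rw [hS]
    conv_lhs => rw [← List.take_append_drop k (V.take m)]
    rw [List.take_take, Nat.min_eq_left (by omega)]
  have hbalS : nOpens S = nCloses S := by
    have h := hbm
    rw [hTm, nOpens_append, nCloses_append] at h
    omega
  have hSsub : S.Sublist V := by
    rw [hS]
    exact (List.drop_sublist _ _).trans (List.take_sublist _ _)
  obtain ⟨s₀, S', hScons⟩ := List.exists_cons_of_ne_nil hSne
  have htagS : ∀ ev ∈ S, ev.2 = -1 ∨ ev.2 = 1 := fun ev hm => tags_V ivs ev (hSsub.subset hm)
  have hclose : ∃ z ∈ S, z.2 = 1 := by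
    by_contra hnc
    push_neg at hnc
    have hall : ∀ a ∈ S, a.2 = -1 := by
      intro a ha
      rcases htagS a ha with h | h
      · exact h
      · exact absurd h (hnc a ha)
    have hc0 : nCloses S = 0 := by
      refine List.countP_eq_zero.mpr ?_
      intro a ha
      simp [hall a ha]
    have ho : nOpens S = S.length := by
      refine List.countP_eq_length.mpr ?_
      intro a ha
      simp [hall a ha]
    omega
  obtain ⟨z, hzS, hz1⟩ := hclose
  have hs₀S : s₀ ∈ S := by rw [hScons]; simp
  have hs₀c : s₀.1 = z.1 := hcon s₀ hs₀S z hzS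
  have hdt : S = (V.drop k).take (m - k) := by
    rw [hS, List.drop_take]
  have h1 : (V.drop k).take 1 = [s₀] := by
    have e : (V.drop k).take (m - k) = s₀ :: S' := by rw [← hdt, hScons]
    calc (V.drop k).take 1 = ((V.drop k).take (m - k)).take 1 := by
          rw [List.take_take, Nat.min_eq_left (by omega)]
      _ = [s₀] := by rw [e]; rfl
  have htake1 : V.take (k + 1) = V.take k ++ [s₀] := by
    rw [List.take_add, h1]
  have hdropS : V.drop k = s₀ :: V.drop (k + 1) := by
    conv_lhs => rw [← List.take_append_drop 1 (V.drop k)]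
    rw [h1, List.drop_drop]
    rfl
  have hs₀open : s₀.2 = -1 := by
    rcases htagS s₀ hs₀S with h | h
    · exact h
    · exfalso
      have hp := pre_V ivs hse (k + 1)
      rw [← hVdef] at hp
      rw [htake1, nOpens_append, nCloses_append] at hp
      have e1 : nCloses [s₀] = 1 := by simp [nCloses, List.countP_cons, h]
      have e2 : nOpens [s₀] = 0 := by simp [nOpens, List.countP_cons, h]
      omega
  have hzV : z ∈ V := hSsub.subset hzS
  have hzE : z ∈ ivs.flatMap evs := ((permV ivs).mem_iff).mp hzV
  obtain ⟨iv, hivmem, hz⟩ := List.mem_flatMap.mp hzE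
  have hivend : iv.2 = z.1 := by
    simp [evs] at hz
    rcases hz with rfl | rfl
    · simp at hz1
    · rfl
  have hcross := List.pairwise_append.mp ((List.take_append_drop k V).symm ▸ hVpw)
  have hallle : ∀ y ∈ V.take k, lexle y s₀ :=
    fun y hy => hcross.2.2 y hy s₀ (by rw [hdropS]; simp)
  have hdpw : (V.drop k).Pairwise lexle := List.Pairwise.sublist (List.drop_sublist _ _) hVpw
  have hallge : ∀ y ∈ V.drop k, y = s₀ ∨ lexle s₀ y := by
    intro y hy
    rw [hdropS] at hy
    rcases List.mem_cons.mp hy with rfl | hy'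
    · exact Or.inl rfl
    · exact Or.inr ((List.pairwise_cons.mp (hdropS ▸ hdpw)).1 y hy')
  have stepA : nCloses (V.take k) ≤ V.countP (fun ev => ev.2 == (1 : Int) && decide (ev.1 < z.1)) := by
    refine le_trans (List.countP_mono_left ?_) ((List.take_sublist k V).countP_le)
    intro a ha hq
    have hle := hallle a ha
    simp only [lexle] at hle
    rw [hs₀c, hs₀open] at hle
    simp only [beq_iff_eq] at hq
    simp only [Bool.and_eq_true, beq_iff_eq, decide_eq_true_eq]
    refine ⟨hq, ?_⟩
    omega
  have stepB : V.countP (fun ev => ev.2 == (-1 : Int) && decide (ev.1 < z.1)) ≤ nOpens (V.take k) := by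
    have hz0 : (V.drop k).countP (fun ev => ev.2 == (-1 : Int) && decide (ev.1 < z.1)) = 0 := by
      refine List.countP_eq_zero.mpr ?_
      intro a ha
      rcases hallge a ha with rfl | hle
      · simp [hs₀c]
      · simp only [lexle] at hle
        rw [hs₀c] at hle
        simp only [Bool.and_eq_true, beq_iff_eq, decide_eq_true_eq, not_and]
        intro _
        omega
    rw [splitV V k, hz0]
    simp only [Nat.add_zero]
    exact List.countP_mono_left (fun a _ hq => by
      simp only [Bool.and_eq_true] at hq
      exact hq.1)
  have htA : V.countP (fun ev => ev.2 == (1 : Int) && decide (ev.1 < z.1)) =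
      ivs.countP (fun iv => decide (iv.2 < z.1)) := by
    rw [List.Perm.countP_eq _ (permV ivs), countP_flat]
    simp
  have htB : V.countP (fun ev => ev.2 == (-1 : Int) && decide (ev.1 < z.1)) =
      ivs.countP (fun iv => decide (iv.1 < z.1)) := by
    rw [List.Perm.countP_eq _ (permV ivs), countP_flat]
    simp
  have hstrictcnt : ivs.countP (fun iv => decide (iv.2 < z.1)) <
      ivs.countP (fun iv => decide (iv.1 < z.1)) := by
    refine countP_strict ?_ iv hivmem ?_ ?_
    · intro a ha hq
      have := hse a ha
      simp only [decide_eq_true_eq] at hq ⊢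
      omega
    · have := hse iv hivmem
      simp only [decide_eq_true_eq]
      omega
    · simp [hivend]
  omega

theorem cnt_iff_cov : ∀ (ivs : List (Int × Int)), (∀ iv ∈ ivs, iv.1 < iv.2) →
    ∀ p : Int, (ivs.countP (fun iv => decide (iv.2 ≤ p)) < ivs.countP (fun iv => decide (iv.1 ≤ p)) ↔
      cov ivs p) := by
  intro ivs
  induction ivs with
  | nil => intro _ p; simp [cov]
  | cons iv t ih =>
    intro h p
    have hh := h iv (by simp)
    have hmono : t.countP (fun iv => decide (iv.2 ≤ p)) ≤ t.countP (fun iv => decide (iv.1 ≤ p)) :=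
      List.countP_mono_left (fun a ha hq => by
        simp only [decide_eq_true_eq] at hq ⊢
        have := h a (by simp [ha])
        omega)
    rw [List.countP_cons, List.countP_cons, cov_cons,
      ← ih (fun a ha => h a (by simp [ha])) p]
    by_cases h1 : iv.2 ≤ p <;> by_cases h2 : iv.1 ≤ p <;> simp [h1, h2] <;> omega

theorem covE_iff_cov (ivs : List (Int × Int)) (hse : ∀ iv ∈ ivs, iv.1 < iv.2) (p : Int) :
    covE (VOf ivs) p ↔ cov ivs p := by
  unfold covE
  rw [List.Perm.countP_eq _ (permV ivs), List.Perm.countP_eq _ (permV ivs),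
    countP_flat, countP_flat]
  simp only [show ((-1 : Int) == (1 : Int)) = false by decide,
    show ((1 : Int) == (1 : Int)) = true by decide,
    show ((-1 : Int) == (-1 : Int)) = true by decide,
    show ((1 : Int) == (-1 : Int)) = false by decide,
    Bool.false_and, Bool.true_and, List.countP_false, Nat.zero_add, Nat.add_zero]
  have := cnt_iff_cov ivs hse p
  simpa using this

theorem foldA (reports : List ((Int × Int) × (Int × Int) × Int)) (target_y : Int) :
    reports.foldl (fun safe_zone r =>
      if |r.1.2 - target_y| < r.2.2 then
        safe_zone ++ [(r.1.1 - (r.2.2 - |r.1.2 - target_y|), r.1.1 + (r.2.2 - |r.1.2 - target_y|) + 1)]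
      else safe_zone) [] = ivsOf reports target_y := by
  rw [PySem.List.foldl_append_ite
    (p := fun r : (Int × Int) × (Int × Int) × Int => |r.1.2 - target_y| < r.2.2)
    (f := fun r : (Int × Int) × (Int × Int) × Int =>
      (r.1.1 - (r.2.2 - |r.1.2 - target_y|), r.1.1 + (r.2.2 - |r.1.2 - target_y|) + 1))]
  simp [ivsOf]

theorem foldB (reports : List ((Int × Int) × (Int × Int) × Int)) (target_y : Int) :
    reports.foldl (fun events r =>
      if 0 < r.2.2 - |r.1.2 - target_y| then
        events ++ [(r.1.1 - (r.2.2 - |r.1.2 - target_y|), -1),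
                   (r.1.1 + (r.2.2 - |r.1.2 - target_y|) + 1, 1)]
      else events) [] = (ivsOf reports target_y).flatMap evs := by
  rw [PySem.List.foldl_ite_eq_foldl_filter
    (p := fun r : (Int × Int) × (Int × Int) × Int => 0 < r.2.2 - |r.1.2 - target_y|)
    (f := fun (acc : List (Int × Int)) (r : (Int × Int) × (Int × Int) × Int) =>
      acc ++ [(r.1.1 - (r.2.2 - |r.1.2 - target_y|), -1),
              (r.1.1 + (r.2.2 - |r.1.2 - target_y|) + 1, 1)])]
  rw [PySem.List.foldl_append_eq_flatMap
    (g := fun r : (Int × Int) × (Int × Int) × Int =>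
      [(r.1.1 - (r.2.2 - |r.1.2 - target_y|), -1),
       (r.1.1 + (r.2.2 - |r.1.2 - target_y|) + 1, 1)])]
  rw [List.filter_congr (q := fun r : (Int × Int) × (Int × Int) × Int =>
      decide (|r.1.2 - target_y| < r.2.2)) (by
    intro x _
    simp only [decide_eq_decide]
    omega)]
  unfold ivsOf
  rw [List.flatMap_map]
  simp [evs, Function.comp]

theorem ivsOf_se (reports : List ((Int × Int) × (Int × Int) × Int)) (target_y : Int) :
    ∀ iv ∈ ivsOf reports target_y, iv.1 < iv.2 := by
  intro iv hm
  unfold ivsOf at hm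
  obtain ⟨r, hr, rfl⟩ := List.mem_map.mp hm
  have := List.of_mem_filter hr
  simp only [decide_eq_true_eq] at this
  simp only
  omega

-- ===== VERDICT (by name: the statement is the Claim_ definition above) =====
theorem get_safe_zone_spec : Claim_equal_get_safe_zone := by
  unfold Claim_equal_get_safe_zone
  intro reports target_y _
  unfold Spec_get_safe_zone
  show get_safe_zone reports target_y = get_safe_zone_alt reports target_y
  unfold get_safe_zone get_safe_zone_alt
  rw [foldA reports target_y, foldB reports target_y]
  set L := ivsOf reports target_y with hL
  have hse : ∀ iv ∈ L, iv.1 < iv.2 := ivsOf_se reports target_y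
  by_cases hnil : L = []
  · rw [hnil]
    rfl
  · unfold merge
    rw [if_neg (by simpa using hnil)]
    have hsperm := PySem.List.sorted2_perm L (fun iv => iv.1) (fun iv => iv.2) false
    have hApw : (PySem.List.sorted2 L (fun iv => iv.1) (fun iv => iv.2) false).Pairwise
        (fun a b => a.1 ≤ b.1) :=
      List.Pairwise.imp (fun h => by unfold lexle at h; omega) (sorted2_pairwise_lexle L)
    have hAse : ∀ iv ∈ PySem.List.sorted2 L (fun iv => iv.1) (fun iv => iv.2) false, iv.1 < iv.2 :=
      fun iv hm => hse iv (hsperm.mem_iff.mp hm)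
    have hA := mergeInv (PySem.List.sorted2 L (fun iv => iv.1) (fun iv => iv.2) false) []
      hAse hApw (by simp) (by simp) (by simp)
    have hB := sweepMain (VOf L) (sorted2_pairwise_lexle _) (tags_V L) (bal_V L)
      (pre_V L hse) (nd_V L hse)
    have heq : (mergeLoop [] (PySem.List.sorted2 L (fun iv => iv.1) (fun iv => iv.2) false)).reverse =
        sweepLoop 0 0 [] (VOf L) := by
      apply uniq _ _ hA.1 hB.1
      intro p
      rw [hA.2 p, hB.2.2 p]
      constructor
      · rintro (hc | hc)
        · exact absurd hc (cov_nil p)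
        · exact (covE_iff_cov L hse p).mpr ((cov_perm hsperm p).mp hc)
      · intro hc
        right
        exact (cov_perm hsperm p).mpr ((covE_iff_cov L hse p).mp hc)
    show (mergeLoop [] (PySem.List.sorted2 L (fun iv => iv.1) (fun iv => iv.2) false)).reverse.map
        (fun iv => [iv.1, iv.2]) = _
    rw [heq]
    rfl
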